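-- pv_equiv track=rewrite | github.com/junslee96/Solving_Algorithim_SQL | 프로그래머스/0/181935. 홀짝에 따라 다른 값 반환하기/홀짝에 따라 다른 값 반환하기.py | solution
-- ===== SOURCE A (Python) =====
-- def solution(n):
--     sum = 0
--     if n % 2 == 0:
--         for i in range(1,n//2+1):
--             sum += i*2*i*2
--         return sum
--     else:
--         for i in range(1,n//2+2):
--             sum += i*2-1
--         return sum
-- ===== SOURCE B (Python) =====
-- def solution(n):
--     if n % 2 == 0:
--         k = n // 2
--         return 2 * k * (k + 1) * (2 * k + 1) // 3 if k > 0 else 0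
--     m = (n + 1) // 2
--     return m * m if m > 0 else 0
-- ===== Notes on version B (the rewrite author's own statement) =====
-- stated objective: faster
-- what changed: Replaced the O(n) accumulation loops by closed-form formulas: the square-pyramidal sum formula for the even branch and the perfect-square formula for the sum of the first odd numbers in the odd branch.
import Mathlib
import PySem

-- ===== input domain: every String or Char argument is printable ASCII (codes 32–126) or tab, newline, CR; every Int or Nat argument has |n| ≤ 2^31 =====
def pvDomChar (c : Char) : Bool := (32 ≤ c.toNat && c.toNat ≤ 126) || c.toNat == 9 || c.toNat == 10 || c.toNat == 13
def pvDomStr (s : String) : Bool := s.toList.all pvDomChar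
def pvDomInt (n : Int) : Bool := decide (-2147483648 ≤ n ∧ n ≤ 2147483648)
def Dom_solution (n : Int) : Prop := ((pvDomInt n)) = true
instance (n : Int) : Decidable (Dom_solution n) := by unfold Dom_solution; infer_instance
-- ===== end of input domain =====

-- B replaces A's O(n) summation loops by O(1) closed-form formulas (return value equivalence).

-- ===== PORT A =====
def solution (n : Int) : Int :=
  if PySem.Int.mod n 2 == 0 then
    (PySem.List.pyRange 1 (PySem.Int.floordiv n 2 + 1) 1).foldl (fun s i => s + i*2*i*2) 0
  else
    (PySem.List.pyRange 1 (PySem.Int.floordiv n 2 + 2) 1).foldl (fun s i => s + (i*2-1)) 0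

-- ===== PORT B =====
def solution_alt (n : Int) : Int :=
  if PySem.Int.mod n 2 == 0 then
    let k := PySem.Int.floordiv n 2
    if k > 0 then PySem.Int.floordiv (2 * k * (k+1) * (2*k+1)) 3 else 0
  else
    let m := PySem.Int.floordiv (n+1) 2
    if m > 0 then m * m else 0

-- ===== PRECONDITION & SPEC =====
def Spec_solution (n : Int) (out : Int) : Prop := out = solution_alt n
instance (n : Int) (out : Int) : Decidable (Spec_solution n out) := by unfold Spec_solution; infer_instance

-- ===== CLAIM (what is proved, stated in full; the proofs are below) =====
def Claim_equal_solution : Prop := ∀ (n : Int), Dom_solution n → Spec_solution n (solution n)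

-- ===== LEMMAS AND PROOFS =====

-- A's even-branch loop, 3 × (Σ_{i=1}^{k} (2i)^2), in closed form.
theorem sumsq_mul3 (k : Nat) :
    3 * ((PySem.List.pyRange 1 ((k : Int) + 1) 1).foldl (fun s i => s + i*2*i*2) 0)
      = 2 * (k : Int) * ((k : Int) + 1) * (2 * (k : Int) + 1) := by
  induction k with
  | zero => simp [PySem.List.pyRange_one_eq_nil]
  | succ k ih =>
      push_cast
      rw [show ((k : Int) + 1 + 1) = ((k : Int) + 1) + 1 by ring,
          PySem.List.pyRange_one_succ_right (a := 1) (b := (k : Int) + 1) (by omega)]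
      rw [List.foldl_append]
      simp only [List.foldl_cons, List.foldl_nil]
      linear_combination ih

-- A's odd-branch loop, Σ_{i=1}^{m} (2i-1), in closed form.
theorem sumodd_sq (m : Nat) :
    (PySem.List.pyRange 1 ((m : Int) + 1) 1).foldl (fun s i => s + (i*2 - 1)) 0
      = (m : Int) * (m : Int) := by
  induction m with
  | zero => simp [PySem.List.pyRange_one_eq_nil]
  | succ m ih =>
      push_cast
      rw [show ((m : Int) + 1 + 1) = ((m : Int) + 1) + 1 by ring,
          PySem.List.pyRange_one_succ_right (a := 1) (b := (m : Int) + 1) (by omega)]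
      rw [List.foldl_append]
      simp only [List.foldl_cons, List.foldl_nil]
      linear_combination ih

theorem even_branch (k : Int) :
    (PySem.List.pyRange 1 (k + 1) 1).foldl (fun s i => s + i*2*i*2) 0
      = if k > 0 then PySem.Int.floordiv (2 * k * (k+1) * (2*k+1)) 3 else 0 := by
  by_cases hk : k > 0
  · simp only [hk, if_pos]
    rw [PySem.Int.floordiv_eq_ediv_of_pos (by norm_num)]
    obtain ⟨m, rfl⟩ : ∃ m : Nat, k = (m : Int) := ⟨k.toNat, by omega⟩
    have h3 := sumsq_mul3 m
    omega
  · simp only [hk, if_false]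
    rw [PySem.List.pyRange_one_eq_nil (by omega)]
    rfl

theorem odd_branch (m : Int) :
    (PySem.List.pyRange 1 (m + 1) 1).foldl (fun s i => s + (i*2 - 1)) 0
      = if m > 0 then m * m else 0 := by
  by_cases hm : m > 0
  · simp only [hm, if_pos]
    obtain ⟨j, rfl⟩ : ∃ j : Nat, m = (j : Int) := ⟨m.toNat, by omega⟩
    exact sumodd_sq j
  · simp only [hm, if_false]
    rw [PySem.List.pyRange_one_eq_nil (by omega)]
    rfl

-- ===== VERDICT (by name: the statement is the Claim_ definition above) =====
theorem solution_spec : Claim_equal_solution := by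
  intro n _
  unfold Spec_solution solution solution_alt
  by_cases h : PySem.Int.mod n 2 == 0
  · simp only [h, if_pos]
    exact even_branch (PySem.Int.floordiv n 2)
  · simp only [h, Bool.false_eq_true, if_false]
    have hfd : PySem.Int.floordiv n 2 + 1 = PySem.Int.floordiv (n+1) 2 := by
      rw [PySem.Int.floordiv_eq_ediv_of_pos (a := n) (by norm_num),
          PySem.Int.floordiv_eq_ediv_of_pos (a := n+1) (by norm_num)]
      have hmod : ¬ PySem.Int.mod n 2 = 0 := by simpa using h
      rw [PySem.Int.mod_eq_emod_of_pos (by norm_num)] at hmod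
      omega
    rw [show PySem.Int.floordiv n 2 + 2 = (PySem.Int.floordiv n 2 + 1) + 1 by ring, hfd]
    exact odd_branch (PySem.Int.floordiv (n+1) 2)
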